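-- pv_equiv track=rewrite | github.com/SAMMiCA/robot_home_service | env/environment.py | strip_return_from_cycle
-- ===== SOURCE A (Python) =====
-- def strip_return_from_cycle(path):
--     seen_rooms, unseen_rooms = set(), set(path)
--     for it, room in enumerate(path):
--         seen_rooms.add(room)
--         if room in unseen_rooms:
--             unseen_rooms.remove(room)
--             if len(unseen_rooms) == 0:
--                 return path[: it + 1]
--     raise ValueError("Bug in `strip_return_from_cycle` implementation")
-- ===== SOURCE B (Python) =====
-- def strip_return_from_cycle(path):
--     # Build a first-occurrence index once; the shortest prefix containing every
--     # distinct room ends at the latest first occurrence.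
--     if not path:
--         raise ValueError("Bug in `strip_return_from_cycle` implementation")
--     first = {}
--     for i, room in enumerate(path):
--         if room not in first:
--             first[room] = i
--     return path[:max(first.values()) + 1]
-- ===== Notes on version B (the rewrite author's own statement) =====
-- stated objective: alternative
-- what changed: Replaces the forward seen/unseen set-tracking loop with early return by building a first-occurrence index dict in one pass and slicing at the maximum first-occurrence index.
import Mathlib
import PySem

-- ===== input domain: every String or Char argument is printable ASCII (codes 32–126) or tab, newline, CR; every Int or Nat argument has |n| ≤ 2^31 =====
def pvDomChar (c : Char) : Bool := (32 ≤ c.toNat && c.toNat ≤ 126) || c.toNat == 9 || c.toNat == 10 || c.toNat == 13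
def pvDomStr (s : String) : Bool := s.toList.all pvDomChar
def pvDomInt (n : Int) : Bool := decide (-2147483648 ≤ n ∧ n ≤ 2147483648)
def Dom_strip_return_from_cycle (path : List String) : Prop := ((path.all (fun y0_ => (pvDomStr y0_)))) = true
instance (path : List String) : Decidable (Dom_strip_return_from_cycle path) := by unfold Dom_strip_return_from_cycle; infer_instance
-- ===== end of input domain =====

-- B replaces A's forward seen/unseen set-tracking loop (with early return) by a single
-- pass building a first-occurrence index dict, slicing at the latest first occurrence
-- (objective: alternative decomposition).

-- ===== PORT A =====
-- the for-loop over enumerate(path); `none` = falling through to the raise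
def stripA_go (path : List String) : List (Int × String) → PySem.Set String → PySem.Set String → Option (List String)
  | [], _seen, _unseen => none
  | (it, room) :: rest, seen, unseen =>
    let seen' := PySem.Set.add seen room
    if PySem.Set.contains unseen room then
      -- `.remove` is guarded by the membership test, so remove? is always `some` here
      let unseen' := (PySem.Set.remove? unseen room).getD unseen
      if PySem.Set.len unseen' == 0 then
        some (PySem.List.slice path none (some (it + 1)))
      else stripA_go path rest seen' unseen'
    else stripA_go path rest seen' unseen

def strip_return_from_cycle (path : List String) : List String :=
  (stripA_go path (PySem.List.enumerate path 0) PySem.Set.empty (PySem.Set.ofList path)).getD []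

-- ===== PORT B =====
-- the for-loop: `if room not in first: first[room] = i`
def stripB_first : List (Int × String) → PySem.Dict String Int → PySem.Dict String Int
  | [], d => d
  | (i, room) :: rest, d =>
    stripB_first rest (if PySem.Dict.contains d room then d else PySem.Dict.insert d room i)

def strip_return_from_cycle_alt (path : List String) : List String :=
  match path with
  | [] => []  -- Python B raises ValueError here; excluded by Pre_
  | _ :: _ =>
    let first := stripB_first (PySem.List.enumerate path 0) PySem.Dict.empty
    -- max() of the values; `first` is nonempty since path is, so max? is always `some`
    let m := (PySem.List.max? (PySem.Dict.values first) (fun v => v)).getD 0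
    PySem.List.slice path none (some (m + 1))

-- ===== PRECONDITION & SPEC =====
-- Pre_ excludes only the empty path, on which the Python A (and B) raise ValueError.
def Pre_strip_return_from_cycle (path : List String) : Prop := path ≠ []
instance (path : List String) : Decidable (Pre_strip_return_from_cycle path) := by
  unfold Pre_strip_return_from_cycle; infer_instance

def pvWitness_strip_return_from_cycle : List String := ["kitchen", "hall", "kitchen"]

def Spec_strip_return_from_cycle (path : List String) (out : List String) : Prop :=
  out = strip_return_from_cycle_alt path
instance (path : List String) (out : List String) : Decidable (Spec_strip_return_from_cycle path out) := by
  unfold Spec_strip_return_from_cycle; infer_instance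

-- ===== CLAIM (what is proved, stated in full; the proofs are below) =====
def Claim_equal_strip_return_from_cycle : Prop :=
  ∀ (path : List String), Dom_strip_return_from_cycle path →
    Pre_strip_return_from_cycle path →
    Spec_strip_return_from_cycle path (strip_return_from_cycle path)

-- ===== LEMMAS AND PROOFS =====

-- monotonicity of prefix membership
theorem pv_mem_take_mono {α : Type} {l : List α} {a : α} {s t : Nat} (hst : s ≤ t)
    (h : a ∈ l.take s) : a ∈ l.take t := by
  have : l.take s = (l.take t).take s := by
    rw [List.take_take, Nat.min_eq_left hst]
  rw [this] at h
  exact List.take_subset _ _ h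

theorem pv_take_succ {α : Type} {l : List α} {k : Nat} (h : k < l.length) :
    l.take (k + 1) = l.take k ++ [l[k]] := by
  rw [List.take_add_one, List.getElem?_eq_getElem h]; rfl

-- A-side loop: if take (M+1) is the shortest all-covering prefix, processing the
-- suffix from index k yields take (M+1)
theorem stripA_main (path : List String) (M : Nat)
    (hcovM : ∀ x ∈ path, x ∈ path.take (M + 1))
    (hminM : ∀ t, t ≤ M → ¬ (∀ x ∈ path, x ∈ path.take t)) :
    ∀ d k (seen unseen : PySem.Set String), path.length - k = d → k < path.length →
      (∀ x, x ∈ unseen ↔ (x ∈ path ∧ x ∉ path.take k)) →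
      ¬ (∀ x ∈ path, x ∈ path.take k) →
      stripA_go path (PySem.List.enumerate (path.drop k) (k : Int)) seen unseen =
        some (path.take (M + 1)) := by
  intro d
  induction d with
  | zero => intro k _ _ hd hk _ _; omega
  | succ d ih =>
    intro k seen unseen hd hk hu hnc
    have hdrop : path.drop k = path[k] :: path.drop (k + 1) := List.drop_eq_getElem_cons hk
    rw [hdrop, PySem.List.enumerate_cons]
    have htake : path.take (k + 1) = path.take k ++ [path[k]] := pv_take_succ hk
    have hmemtake1 : ∀ x, x ∈ path.take (k + 1) ↔ (x ∈ path.take k ∨ x = path[k]) := by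
      intro x; rw [htake, List.mem_append, List.mem_singleton]
    by_cases hm : path[k] ∈ path.take k
    · -- duplicate room: not in unseen, loop continues with same unseen
      have hcont : PySem.Set.contains unseen path[k] = false := by
        rw [Bool.eq_false_iff]
        intro hcc
        rw [PySem.Set.contains_iff] at hcc
        exact ((hu _).mp hcc).2 hm
      simp only [stripA_go, hcont]
      have hnc' : ¬ (∀ x ∈ path, x ∈ path.take (k + 1)) := by
        intro hcov
        exact hnc (fun x hx => by
          rcases (hmemtake1 x).mp (hcov x hx) with h | h
          · exact h
          · rw [h]; exact hm)
      have hk1 : k + 1 < path.length := by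
        rcases Nat.lt_or_ge (k + 1) path.length with h | h
        · exact h
        · exact absurd (fun x hx => by rwa [List.take_of_length_le h]) hnc'
      have hu' : ∀ x, x ∈ unseen ↔ (x ∈ path ∧ x ∉ path.take (k + 1)) := by
        intro x
        rw [hu x, hmemtake1]
        constructor
        · rintro ⟨h1, h2⟩
          refine ⟨h1, ?_⟩
          rintro (h | h)
          · exact h2 h
          · rw [h] at h2; exact h2 hm
        · rintro ⟨h1, h2⟩
          exact ⟨h1, fun h => h2 (Or.inl h)⟩
      have hcast : (k : Int) + 1 = ((k + 1 : Nat) : Int) := by push_cast; ring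
      rw [hcast]
      exact ih (k + 1) _ unseen (by omega) hk1 hu' hnc'
    · -- first occurrence: remove it from unseen
      have hkm : path[k] ∈ unseen := (hu _).mpr ⟨List.getElem_mem hk, hm⟩
      have hcont : PySem.Set.contains unseen path[k] = true :=
        (PySem.Set.contains_iff _ _).mpr hkm
      simp only [stripA_go, hcont, if_true, PySem.Set.remove?_of_mem hkm, Option.getD_some]
      have hu' : ∀ x, x ∈ PySem.Set.discard unseen path[k] ↔
          (x ∈ path ∧ x ∉ path.take (k + 1)) := by
        intro x
        rw [PySem.Set.mem_discard, hu x, hmemtake1]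
        constructor
        · rintro ⟨⟨h1, h2⟩, h3⟩
          exact ⟨h1, fun h => by rcases h with h | h; exact h2 h; exact h3 h⟩
        · rintro ⟨h1, h2⟩
          exact ⟨⟨h1, fun h => h2 (Or.inl h)⟩, fun h => h2 (Or.inr h)⟩
      by_cases hz : PySem.Set.discard unseen path[k] = []
      · -- unseen is now empty: every room occurs in path[:k+1]
        have hcov : ∀ x ∈ path, x ∈ path.take (k + 1) := by
          intro x hx
          by_contra hnx
          have : x ∈ PySem.Set.discard unseen path[k] := (hu' x).mpr ⟨hx, hnx⟩
          rw [hz] at this; simp at this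
        have hkM : k = M := by
          have h1 : ¬ (k + 1 ≤ M) := fun h => hminM (k + 1) h hcov
          have h2 : ¬ (M + 1 ≤ k) := by
            intro h
            exact hnc (fun x hx => pv_mem_take_mono h (hcovM x hx))
          omega
        have hlen : (PySem.Set.len (PySem.Set.discard unseen path[k]) == 0) = true := by
          rw [hz]; rfl
        rw [hlen]
        simp only [if_true]
        have hcast : (k : Int) + 1 = ((k + 1 : Nat) : Int) := by push_cast; ring
        rw [hcast, PySem.List.slice_to_natCast, hkM]
      · -- still rooms unseen: recurse
        have hlen : (PySem.Set.len (PySem.Set.discard unseen path[k]) == 0) = false := by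
          rcases h : PySem.Set.discard unseen path[k] with _ | ⟨y, ys⟩
          · exact absurd h hz
          · rfl
        rw [hlen]
        simp only [Bool.false_eq_true, if_false]
        obtain ⟨y, hy⟩ : ∃ y, y ∈ PySem.Set.discard unseen path[k] :=
          List.exists_mem_of_ne_nil _ hz
        have hy' := (hu' y).mp hy
        have hnc' : ¬ (∀ x ∈ path, x ∈ path.take (k + 1)) := by
          intro hcov
          exact hy'.2 (hcov y hy'.1)
        have hk1 : k + 1 < path.length := by
          rcases Nat.lt_or_ge (k + 1) path.length with h | h
          · exact h
          · exact absurd (fun x hx => by rwa [List.take_of_length_le h]) hnc'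
        have hcast : (k : Int) + 1 = ((k + 1 : Nat) : Int) := by push_cast; ring
        rw [hcast]
        exact ih (k + 1) _ _ (by omega) hk1 hu' hnc'

-- B-side loop invariant: the dict's values are exactly the first-occurrence indices
theorem stripB_first_inv (path : List String) :
    ∀ d k (dct : PySem.Dict String Int), path.length - k = d →
      (∀ room, PySem.Dict.contains dct room = true ↔ room ∈ path.take k) →
      (∀ v ∈ PySem.Dict.values dct,
        ∃ j, ∃ _ : j < path.length, v = (j : Int) ∧ path[j] ∉ path.take j) →
      (∀ j, (hj : j < path.length) → j < k → path[j] ∉ path.take j →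
        ((j : Int)) ∈ PySem.Dict.values dct) →
      (∀ v ∈ PySem.Dict.values
          (stripB_first (PySem.List.enumerate (path.drop k) (k : Int)) dct),
        ∃ j, ∃ _ : j < path.length, v = (j : Int) ∧ path[j] ∉ path.take j) ∧
      (∀ j, (hj : j < path.length) → path[j] ∉ path.take j →
        ((j : Int)) ∈ PySem.Dict.values
          (stripB_first (PySem.List.enumerate (path.drop k) (k : Int)) dct)) := by
  intro d
  induction d with
  | zero =>
    intro k dct hd hk1 h2 h3
    have hkn : path.length ≤ k := by omega
    rw [List.drop_eq_nil_of_le hkn, PySem.List.enumerate_nil]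
    exact ⟨fun v hv => h2 v hv, fun j hj hfo => h3 j hj (by omega) hfo⟩
  | succ d ih =>
    intro k dct hd h1 h2 h3
    have hk : k < path.length := by omega
    have hdrop : path.drop k = path[k] :: path.drop (k + 1) := List.drop_eq_getElem_cons hk
    rw [hdrop, PySem.List.enumerate_cons]
    have htake : path.take (k + 1) = path.take k ++ [path[k]] := pv_take_succ hk
    have hmemtake1 : ∀ x, x ∈ path.take (k + 1) ↔ (x ∈ path.take k ∨ x = path[k]) := by
      intro x; rw [htake, List.mem_append, List.mem_singleton]
    have hcast : (k : Int) + 1 = ((k + 1 : Nat) : Int) := by push_cast; ring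
    by_cases hm : path[k] ∈ path.take k
    · -- room seen before: dict unchanged
      have hcb : PySem.Dict.contains dct path[k] = true := (h1 _).mpr hm
      simp only [stripB_first, hcb, if_true]
      rw [hcast]
      refine ih (k + 1) dct (by omega) ?_ h2 ?_
      · intro room
        rw [h1 room, hmemtake1]
        constructor
        · exact fun h => Or.inl h
        · rintro (h | h)
          · exact h
          · rw [h]; exact hm
      · intro j hj hjk hfo
        rcases Nat.lt_or_ge j k with h | h
        · exact h3 j hj h hfo
        · have : j = k := by omega
          subst this
          exact absurd hm hfo
    · -- first occurrence: record it
      have hcb : PySem.Dict.contains dct path[k] = false := by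
        rw [Bool.eq_false_iff]
        intro hcc
        exact hm ((h1 _).mp hcc)
      simp only [stripB_first, hcb, Bool.false_eq_true, if_false]
      have hval : PySem.Dict.values (PySem.Dict.insert dct path[k] (k : Int)) =
          PySem.Dict.values dct ++ [(k : Int)] := by
        simp [PySem.Dict.values, PySem.Dict.items_insert_of_not_contains dct (k : Int) hcb]
      rw [hcast]
      refine ih (k + 1) _ (by omega) ?_ ?_ ?_
      · intro room
        rw [PySem.Dict.contains_insert, hmemtake1, Bool.or_eq_true, beq_iff_eq, h1 room]
        tauto
      · intro v hv
        rw [hval, List.mem_append, List.mem_singleton] at hv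
        rcases hv with hv | hv
        · exact h2 v hv
        · exact ⟨k, hk, hv, hm⟩
      · intro j hj hjk hfo
        rw [hval, List.mem_append, List.mem_singleton]
        rcases Nat.lt_or_ge j k with h | h
        · exact Or.inl (h3 j hj h hfo)
        · have : j = k := by omega
          subst this
          exact Or.inr rfl

-- ===== VERDICT (by name: the statement is the Claim_ definition above) =====
theorem strip_return_from_cycle_spec : Claim_equal_strip_return_from_cycle := by
  intro path _ hne
  unfold Spec_strip_return_from_cycle
  unfold Pre_strip_return_from_cycle at hne
  rcases path with _ | ⟨a, l⟩
  · exact absurd rfl hne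
  set p : List String := a :: l with hp
  have hn : 0 < p.length := by simp [hp]
  -- B side: the first-occurrence dict's values
  obtain ⟨hP2, hP3⟩ := stripB_first_inv p p.length 0 PySem.Dict.empty (by omega)
    (by intro room; simp [PySem.Dict.contains_empty])
    (by intro v hv; simp [PySem.Dict.values, PySem.Dict.empty] at hv)
    (by intro j hj hjk hfo; omega)
  rw [List.drop_zero] at hP2 hP3
  set V := PySem.Dict.values
    (stripB_first (PySem.List.enumerate p ((0 : Nat) : Int)) PySem.Dict.empty) with hV
  have h0 : ((0 : Nat) : Int) ∈ V := hP3 0 hn (by simp)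
  obtain ⟨m, hmax⟩ : ∃ m, PySem.List.max? V (fun v => v) = some m := by
    rcases h : PySem.List.max? V (fun v => v) with _ | m
    · rw [PySem.List.max?_eq_none_iff] at h
      rw [h] at h0
      simp at h0
    · exact ⟨m, rfl⟩
  obtain ⟨M, hMlt, hMeq, hMfo⟩ := hP2 m (PySem.List.max?_mem hmax)
  -- take (M+1) covers all rooms
  have hkey : ∀ j, (hj : j < p.length) → p[j] ∈ p.take (M + 1) := by
    intro j
    induction j using Nat.strong_induction_on with
    | _ j ihj =>
      intro hj
      by_cases hjm : p[j] ∈ p.take j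
      · rw [List.mem_iff_getElem] at hjm
        obtain ⟨k, hk, hke⟩ := hjm
        have hkj : k < j := by
          have := hk; rw [List.length_take] at this; omega
        have hkp : k < p.length := by
          have := hk; rw [List.length_take] at this; omega
        rw [List.getElem_take] at hke
        rw [← hke]
        exact ihj k hkj hkp
      · have hjV : ((j : Nat) : Int) ∈ V := hP3 j hj hjm
        have hle : ((j : Nat) : Int) ≤ m := PySem.List.max?_isMax hmax _ hjV
        have hjM : j ≤ M := by rw [hMeq] at hle; exact_mod_cast hle
        have hjt : j < (p.take (M + 1)).length := by
          rw [List.length_take]; omega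
        have := List.getElem_mem hjt
        rwa [List.getElem_take] at this
  have hcovM : ∀ x ∈ p, x ∈ p.take (M + 1) := by
    intro x hx
    rw [List.mem_iff_getElem] at hx
    obtain ⟨j, hj, hje⟩ := hx
    rw [← hje]; exact hkey j hj
  have hminM : ∀ t, t ≤ M → ¬ (∀ x ∈ p, x ∈ p.take t) := by
    intro t ht hcov
    have h1 : p[M] ∈ p.take t := hcov _ (List.getElem_mem hMlt)
    exact hMfo (pv_mem_take_mono ht h1)
  -- A side
  have hu0 : ∀ x, x ∈ PySem.Set.ofList p ↔ (x ∈ p ∧ x ∉ p.take 0) := by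
    intro x; rw [PySem.Set.mem_ofList]; simp
  have hnc0 : ¬ (∀ x ∈ p, x ∈ p.take 0) := by
    intro h
    simpa using h a (by simp [hp])
  have hmain := stripA_main p M hcovM hminM p.length 0 PySem.Set.empty
    (PySem.Set.ofList p) (by omega) hn hu0 hnc0
  rw [List.drop_zero] at hmain
  unfold strip_return_from_cycle
  rw [show ((0 : Nat) : Int) = (0 : Int) from rfl] at hmain
  rw [hmain, Option.getD_some]
  -- B side result
  show p.take (M + 1) = strip_return_from_cycle_alt p
  rw [hp]
  simp only [strip_return_from_cycle_alt]
  rw [← hp]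
  rw [show (0 : Int) = ((0 : Nat) : Int) from rfl, ← hV, hmax, Option.getD_some, hMeq]
  rw [show ((M : Nat) : Int) + 1 = ((M + 1 : Nat) : Int) by push_cast; ring,
    PySem.List.slice_to_natCast]
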